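-- pv_equiv track=rewrite | github.com/W-Moorer/NexDynIPC | tools/csv_visualizer.py | _sort_xyz_columns
-- ===== SOURCE A (Python) =====
-- from typing import Dict, List, Tuple, Optional
--
-- def _sort_xyz_columns(columns: List[str]) -> List[str]:
--     """
--     将XYZ三轴列按X, Y, Z顺序排序
--
--     Args:
--         columns: 列名列表
--
--     Returns:
--         List: 排序后的列名列表
--     """
--     def get_axis_order(col_name: str) -> int:
--         """获取轴向排序权重"""
--         col_lower = col_name.lower()
--         if any(x in col_lower for x in ['_x', 'x_', 'x']):
--             # 优先匹配明确的x标记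
--             if '_x' in col_lower or 'x_' in col_lower or col_lower.endswith('x'):
--                 return 0
--         if any(y in col_lower for y in ['_y', 'y_', 'y']):
--             if '_y' in col_lower or 'y_' in col_lower or col_lower.endswith('y'):
--                 return 1
--         if any(z in col_lower for z in ['_z', 'z_', 'z']):
--             if '_z' in col_lower or 'z_' in col_lower or col_lower.endswith('z'):
--                 return 2
--         # 对于roll/pitch/yaw或phi/theta/psi
--         if any(r in col_lower for r in ['roll', 'phi']):
--             return 0
--         if any(p in col_lower for p in ['pitch', 'theta']):
--             return 1
--         if any(y in col_lower for y in ['yaw', 'psi']):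
--             return 2
--         return 3
--
--     return sorted(columns, key=get_axis_order)
-- ===== SOURCE B (Python) =====
-- from typing import List
--
-- def _sort_xyz_columns(columns: List[str]) -> List[str]:
--     """Table-driven classifier + four stable filter passes instead of sorted(key=...)."""
--     ANGLE_WORDS = (('roll', 'phi'), ('pitch', 'theta'), ('yaw', 'psi'))
--
--     def axis(col: str) -> int:
--         cl = col.lower()
--         for i, ch in enumerate('xyz'):
--             # '_x' in cl / 'x_' in cl / cl ends with 'x' each imply 'x' in cl,
--             # so A's outer any([...]) guard is redundant and dropped here
--             if '_' + ch in cl or ch + '_' in cl or cl.endswith(ch):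
--                 return i
--         for i, words in enumerate(ANGLE_WORDS):
--             if any(w in cl for w in words):
--                 return i
--         return 3
--
--     out: List[str] = []
--     for k in range(4):
--         out.extend(c for c in columns if axis(c) == k)
--     return out
-- ===== Notes on version B (the rewrite author's own statement) =====
-- stated objective: alternative
-- what changed: Replaces sorted(columns, key=get_axis_order) with four stable filter passes (one per axis weight, concatenated) and rewrites the classifier as a table-driven loop over the axis letters and the angle-word table, dropping A's redundant outer any guards.
import Mathlib
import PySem

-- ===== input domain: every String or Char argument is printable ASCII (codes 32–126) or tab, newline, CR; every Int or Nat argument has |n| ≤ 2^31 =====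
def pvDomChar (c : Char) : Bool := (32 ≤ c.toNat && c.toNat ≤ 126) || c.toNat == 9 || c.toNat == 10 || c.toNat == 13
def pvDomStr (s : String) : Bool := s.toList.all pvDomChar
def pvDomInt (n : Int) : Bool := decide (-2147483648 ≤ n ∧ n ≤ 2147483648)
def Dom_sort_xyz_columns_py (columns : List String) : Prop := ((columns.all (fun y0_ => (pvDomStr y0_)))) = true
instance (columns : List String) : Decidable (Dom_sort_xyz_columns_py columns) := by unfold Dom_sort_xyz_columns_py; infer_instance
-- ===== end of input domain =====

-- B replaces sorted(key=get_axis_order) by four stable filter passes (one per weight, concatenated)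
-- and a table-driven classifier looped over ('x','y','z') and the angle-word table.


-- ===== PORT A =====
-- get_axis_order, step for step (a bodyless 'if … : if … : return k' fall-through is the
-- conjunction of the two tests)
def axisOrderPy (col_name : String) : Int :=
  let cl := PySem.Str.lower col_name
  if (["_x", "x_", "x"].any fun x => PySem.Str.isIn x cl) &&
     (PySem.Str.isIn "_x" cl || PySem.Str.isIn "x_" cl || PySem.Str.endswith cl "x") then 0
  else if (["_y", "y_", "y"].any fun y => PySem.Str.isIn y cl) &&
     (PySem.Str.isIn "_y" cl || PySem.Str.isIn "y_" cl || PySem.Str.endswith cl "y") then 1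
  else if (["_z", "z_", "z"].any fun z => PySem.Str.isIn z cl) &&
     (PySem.Str.isIn "_z" cl || PySem.Str.isIn "z_" cl || PySem.Str.endswith cl "z") then 2
  else if (["roll", "phi"].any fun r => PySem.Str.isIn r cl) then 0
  else if (["pitch", "theta"].any fun p => PySem.Str.isIn p cl) then 1
  else if (["yaw", "psi"].any fun y => PySem.Str.isIn y cl) then 2
  else 3

def sort_xyz_columns_py (columns : List String) : List String :=
  PySem.List.sorted columns axisOrderPy false

-- ===== PORT B =====
-- the 'for i, ch in enumerate('xyz'): if … : return i' loop (early return = Option)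
def scanAxes (cl : String) : List (Int × String) → Option Int
  | [] => none
  | (i, ch) :: rest =>
      if PySem.Str.isIn ("_" ++ ch) cl || PySem.Str.isIn (ch ++ "_") cl ||
         PySem.Str.endswith cl ch then some i
      else scanAxes cl rest

-- the 'for i, words in enumerate(ANGLE_WORDS): if any(…): return i' loop
def scanWords (cl : String) : List (Int × List String) → Option Int
  | [] => none
  | (i, ws) :: rest =>
      if ws.any fun w => PySem.Str.isIn w cl then some i
      else scanWords cl rest

def axisAltPy (col : String) : Int :=
  let cl := PySem.Str.lower col
  match scanAxes cl [(0, "x"), (1, "y"), (2, "z")] with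
  | some i => i
  | none =>
    match scanWords cl [(0, ["roll", "phi"]), (1, ["pitch", "theta"]), (2, ["yaw", "psi"])] with
    | some i => i
    | none => 3

-- out = []; for k in range(4): out.extend(c for c in columns if axis(c) == k)
def sort_xyz_columns_py_alt (columns : List String) : List String :=
  (PySem.List.pyRange 0 4 1).foldl
    (fun out k => out ++ columns.filter (fun c => axisAltPy c == k)) []

-- ===== PRECONDITION & SPEC =====
def Spec_sort_xyz_columns_py (columns : List String) (out : List String) : Prop := out = sort_xyz_columns_py_alt columns
instance (columns : List String) (out : List String) : Decidable (Spec_sort_xyz_columns_py columns out) := by unfold Spec_sort_xyz_columns_py; infer_instance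

-- ===== CLAIM (what is proved, stated in full; the proofs are below) =====
def Claim_equal_sort_xyz_columns_py : Prop := ∀ (columns : List String), Dom_sort_xyz_columns_py columns → Spec_sort_xyz_columns_py columns (sort_xyz_columns_py columns)

-- ===== LEMMAS AND PROOFS =====

-- a suffix of cl is a substring of cl
lemma isIn_of_endswith (cl p : String) (h : PySem.Str.endswith cl p = true) :
    PySem.Str.isIn p cl = true := by
  rw [PySem.Str.isIn_iff_infix]
  have h' : p.toList <:+ cl.toList :=
    (PySem.Chars.endswith_iff cl.toList p.toList).mp
      (by simpa [PySem.Str.endswith_eq] using h)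
  exact h'.isInfix

-- A's outer any-guards are redundant: each inner disjunct implies membership of the bare letter
lemma redund (cl u p l : String) :
    (([u, p, l].any fun x => PySem.Str.isIn x cl) &&
      (PySem.Str.isIn u cl || PySem.Str.isIn p cl || PySem.Str.endswith cl l))
    = (PySem.Str.isIn u cl || PySem.Str.isIn p cl || PySem.Str.endswith cl l) := by
  cases h1 : PySem.Str.isIn u cl <;> cases h2 : PySem.Str.isIn p cl <;>
    cases h3 : PySem.Str.endswith cl l <;>
    simp only [List.any_cons, List.any_nil, h1, h2, Bool.or_false, Bool.false_or,
      Bool.or_true, Bool.true_or, Bool.and_true, Bool.and_false];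
    first
    | rfl
    | simp only [isIn_of_endswith cl l h3]

-- the two classifiers agree
lemma axis_eq (c : String) : axisAltPy c = axisOrderPy c := by
  unfold axisAltPy axisOrderPy
  simp only [scanAxes, scanWords]
  rw [show ("_" ++ "x" : String) = "_x" from rfl, show ("x" ++ "_" : String) = "x_" from rfl,
      show ("_" ++ "y" : String) = "_y" from rfl, show ("y" ++ "_" : String) = "y_" from rfl,
      show ("_" ++ "z" : String) = "_z" from rfl, show ("z" ++ "_" : String) = "z_" from rfl,
      redund _ "_x" "x_" "x", redund _ "_y" "y_" "y", redund _ "_z" "z_" "z"]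
  split_ifs <;> rfl

-- the bucket of weight k, as a filter
def bf (k : Int) (xs : List String) : List String := xs.filter (fun c => axisOrderPy c == k)

lemma axisOrderPy_cases (c : String) :
    axisOrderPy c = 0 ∨ axisOrderPy c = 1 ∨ axisOrderPy c = 2 ∨ axisOrderPy c = 3 := by
  unfold axisOrderPy
  dsimp only
  split_ifs <;> simp

lemma mem_bf {k : Int} {xs : List String} {y : String} (h : y ∈ bf k xs) : axisOrderPy y = k := by
  have := (List.mem_filter.mp h).2
  simpa using this

lemma insertBy_skip {α : Type} (before : α → α → Bool) (x : α) (ys zs : List α)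
    (h : ∀ y ∈ ys, before x y = false) :
    PySem.List.insertBy before x (ys ++ zs) = ys ++ PySem.List.insertBy before x zs := by
  induction ys with
  | nil => simp
  | cons y ys ih =>
    have hy : before x y = false := h y (by simp)
    simp [PySem.List.insertBy, hy, ih (fun z hz => h z (by simp [hz]))]

lemma insertBy_front {α : Type} (before : α → α → Bool) (x : α) (zs : List α)
    (h : ∀ y ∈ zs, before x y = true) :
    PySem.List.insertBy before x zs = x :: zs := by
  cases zs with
  | nil => rfl
  | cons z t => simp [PySem.List.insertBy, h z (by simp)]

lemma sorted_eq_buckets (xs : List String) :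
    PySem.List.sorted xs axisOrderPy false = bf 0 xs ++ bf 1 xs ++ bf 2 xs ++ bf 3 xs := by
  rw [PySem.List.sorted_eq_foldl_insertBy]
  induction xs using List.reverseRecOn with
  | nil => simp [bf]
  | append_singleton ys x ih =>
    rw [List.foldl_append, List.foldl_cons, List.foldl_nil, ih]
    have hbf : ∀ k : Int, bf k (ys ++ [x]) =
        bf k ys ++ (if axisOrderPy x = k then [x] else []) := by
      intro k; simp [bf, List.filter_append, List.filter_cons]
    rcases axisOrderPy_cases x with hx | hx | hx | hx
    · rw [show bf 0 ys ++ bf 1 ys ++ bf 2 ys ++ bf 3 ys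
            = bf 0 ys ++ (bf 1 ys ++ bf 2 ys ++ bf 3 ys) by simp [List.append_assoc]]
      rw [insertBy_skip _ _ _ _ (by intro y hy; simp [hx, mem_bf hy])]
      rw [insertBy_front _ _ _ (by
        intro y hy
        simp only [List.mem_append] at hy
        rcases hy with (hy | hy) | hy <;> simp [hx, mem_bf hy])]
      simp [hbf, hx]
    · rw [show bf 0 ys ++ bf 1 ys ++ bf 2 ys ++ bf 3 ys
            = (bf 0 ys ++ bf 1 ys) ++ (bf 2 ys ++ bf 3 ys) by simp [List.append_assoc]]
      rw [insertBy_skip _ _ _ _ (by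
        intro y hy
        simp only [List.mem_append] at hy
        rcases hy with hy | hy <;> simp [hx, mem_bf hy])]
      rw [insertBy_front _ _ _ (by
        intro y hy
        simp only [List.mem_append] at hy
        rcases hy with hy | hy <;> simp [hx, mem_bf hy])]
      simp [hbf, hx]
    · rw [show bf 0 ys ++ bf 1 ys ++ bf 2 ys ++ bf 3 ys
            = (bf 0 ys ++ bf 1 ys ++ bf 2 ys) ++ bf 3 ys by simp [List.append_assoc]]
      rw [insertBy_skip _ _ _ _ (by
        intro y hy
        simp only [List.mem_append] at hy
        rcases hy with (hy | hy) | hy <;> simp [hx, mem_bf hy])]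
      rw [insertBy_front _ _ _ (by intro y hy; simp [hx, mem_bf hy])]
      simp [hbf, hx]
    · rw [PySem.List.insertBy_of_forall_not_before _ _ _ (by
        intro y hy
        simp only [List.mem_append] at hy
        rcases hy with ((hy | hy) | hy) | hy <;> simp [hx, mem_bf hy])]
      simp [hbf, hx]

lemma alt_eq_buckets (xs : List String) :
    sort_xyz_columns_py_alt xs = bf 0 xs ++ bf 1 xs ++ bf 2 xs ++ bf 3 xs := by
  unfold sort_xyz_columns_py_alt
  rw [show PySem.List.pyRange 0 4 1 = [0, 1, 2, 3] from rfl]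
  simp only [List.foldl_cons, List.foldl_nil, List.nil_append]
  have hf : ∀ k : Int, xs.filter (fun c => axisAltPy c == k) = bf k xs := by
    intro k; unfold bf; congr 1; funext c; rw [axis_eq]
  rw [hf 0, hf 1, hf 2, hf 3]

-- ===== VERDICT (by name: the statement is the Claim_ definition above) =====
theorem sort_xyz_columns_py_spec : Claim_equal_sort_xyz_columns_py := by
  intro columns _
  unfold Spec_sort_xyz_columns_py sort_xyz_columns_py
  rw [sorted_eq_buckets, alt_eq_buckets]
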